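-- pv_equiv track=rewrite | github.com/rihuaa/project2 | exp_eval.py | postfix_valid
-- ===== SOURCE A (Python) =====
-- def postfix_valid(postfix_expr):
--     """ To test for an invalid postfix expression.
--     You may assume that what is passed in is a string
--     that only contains numbers and operators. These are separated into
--     valid tokens by spaces so you can use split and join as necessary.
--
--     Note:
--         No parantheses in postfix expression.
--
--     Args:
--         list (postfix_expr): list to check for postfix validity
--
--     Returns:
--         bool: True if valid, False otherwise
--     """
--     expr = postfix_expr.split()
--     count = 0
--     if postfix_expr == "":
--         return False
--     for token in expr:
--         if token[0] in '0123456789':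
--             count += 1
--         elif token == '~':
--             pass
--         else: # all other binary operators
--             count -= 1
--         if count < 0:
--             return False
--     if count == 1:
--         return True
--     return False
-- ===== SOURCE B (Python) =====
-- def postfix_valid(postfix_expr):
--     toks = postfix_expr.split()
--     if not toks:
--         return False
--
--     def summary(seg):
--         # (total delta, minimum prefix-delta) of a nonempty token segment
--         if len(seg) == 1:
--             t = seg[0]
--             d = 1 if t[0] in '0123456789' else (0 if t == '~' else -1)
--             return d, d
--         mid = len(seg) // 2
--         t1, m1 = summary(seg[:mid])
--         t2, m2 = summary(seg[mid:])
--         return t1 + t2, min(m1, t1 + m2)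
--
--     total, mn = summary(toks)
--     return total == 1 and mn >= 0
-- ===== Notes on version B (the rewrite author's own statement) =====
-- stated objective: alternative
-- what changed: Replaces A's linear early-exit counter loop with a divide-and-conquer parse: each half of the token list is summarised as a (total delta, minimum prefix delta) pair, the two summaries are merged by the monoid rule (t1+t2, min(m1, t1+m2)), and validity is total==1 and min-prefix>=0.
import Mathlib
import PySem

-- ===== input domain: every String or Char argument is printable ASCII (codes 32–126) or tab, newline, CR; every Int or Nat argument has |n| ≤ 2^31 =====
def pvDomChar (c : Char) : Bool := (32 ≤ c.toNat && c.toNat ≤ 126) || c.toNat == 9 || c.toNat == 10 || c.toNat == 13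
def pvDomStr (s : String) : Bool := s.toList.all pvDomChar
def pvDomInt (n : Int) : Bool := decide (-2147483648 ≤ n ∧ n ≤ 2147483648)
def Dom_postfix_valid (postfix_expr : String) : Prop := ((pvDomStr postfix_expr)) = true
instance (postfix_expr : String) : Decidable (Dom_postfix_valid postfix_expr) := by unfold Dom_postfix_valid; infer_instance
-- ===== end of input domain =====

-- B replaces A's linear early-exit counter loop by a divide-and-conquer (total, min-prefix) segment summary (objective: alternative, same cost).

-- ===== PORT A =====
-- token[0] in '0123456789'; split() tokens are nonempty, so the none branch is unreachable
def pvTokDigit (token : String) : Bool :=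
  match PySem.Str.pyGet? token 0 with
  | some c => PySem.Chars.isIn [c] ("0123456789".toList)
  | none => false

def pvLoopA : List String → Int → Bool
  | [], count => count == 1
  | token :: rest, count =>
    let count :=
      if pvTokDigit token then count + 1
      else if token == "~" then count
      else count - 1
    if count < 0 then false else pvLoopA rest count

def postfix_valid (postfix_expr : String) : Bool :=
  let expr := PySem.Str.split₀ postfix_expr
  if postfix_expr == "" then false
  else pvLoopA expr 0

-- ===== PORT B =====
def pvDelta (t : String) : Int :=
  if (match PySem.Str.pyGet? t 0 with
      | some c => PySem.Chars.isIn [c] ("0123456789".toList)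
      | none => false) then 1
  else if t == "~" then 0 else -1

-- summary(seg): B only ever calls it on nonempty segments; the [] case is an
-- unreachable totality filler.
def pvSummary : List String → Int × Int
  | [] => (0, 0)
  | [t] => (pvDelta t, pvDelta t)
  | a :: b :: rest =>
      let mid := (a :: b :: rest).length / 2
      let s1 := pvSummary ((a :: b :: rest).take mid)
      let s2 := pvSummary ((a :: b :: rest).drop mid)
      (s1.1 + s2.1, min s1.2 (s1.1 + s2.2))
termination_by seg => seg.length
decreasing_by
  · simp [List.length_take]; omega
  · simp; omega

def postfix_valid_alt (postfix_expr : String) : Bool :=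
  let toks := PySem.Str.split₀ postfix_expr
  if toks.isEmpty then false
  else
    let s := pvSummary toks
    (s.1 == 1) && decide (0 ≤ s.2)

-- ===== PRECONDITION & SPEC =====
def Spec_postfix_valid (postfix_expr : String) (out : Bool) : Prop := out = postfix_valid_alt postfix_expr
instance (postfix_expr : String) (out : Bool) : Decidable (Spec_postfix_valid postfix_expr out) := by unfold Spec_postfix_valid; infer_instance

-- ===== CLAIM (what is proved, stated in full; the proofs are below) =====
def Claim_equal_postfix_valid : Prop := ∀ (postfix_expr : String), Dom_postfix_valid postfix_expr → Spec_postfix_valid postfix_expr (postfix_valid postfix_expr)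

-- ===== LEMMAS AND PROOFS =====

-- total delta of a token list
def pvSum : List String → Int
  | [] => 0
  | t :: ts => pvDelta t + pvSum ts

-- minimum over the nonempty prefixes of the delta sums (0 for [])
def pvMinPre : List String → Int
  | [] => 0
  | t :: ts => min (pvDelta t) (pvDelta t + pvMinPre ts)

lemma pvSum_append (l r : List String) : pvSum (l ++ r) = pvSum l + pvSum r := by
  induction l with
  | nil => simp [pvSum]
  | cons t ts ih => simp [pvSum, ih]; ring

lemma pvMinPre_append (l r : List String) (hl : l ≠ []) :
    pvMinPre (l ++ r) = min (pvMinPre l) (pvSum l + pvMinPre r) := by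
  induction l with
  | nil => exact absurd rfl hl
  | cons t ts ih =>
    cases ts with
    | nil => simp [pvMinPre, pvSum]
    | cons u us =>
      have := ih (by simp)
      simp only [List.cons_append, pvMinPre, pvSum] at *
      rw [this]
      omega

lemma pvSummary_eq (seg : List String) (h : seg ≠ []) :
    pvSummary seg = (pvSum seg, pvMinPre seg) := by
  induction seg using pvSummary.induct with
  | case1 => exact absurd rfl h
  | case2 t => simp [pvSummary, pvSum, pvMinPre]
  | case3 a b rest mid ih1 ih2 =>
    have hlen : (a :: b :: rest).length / 2 ≥ 1 ∧ (a :: b :: rest).length / 2 < (a :: b :: rest).length := by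
      simp; omega
    have htake : (a :: b :: rest).take ((a :: b :: rest).length / 2) ≠ [] := by
      simp [List.take_eq_nil_iff]
    have hdrop : (a :: b :: rest).drop ((a :: b :: rest).length / 2) ≠ [] := by
      intro hc
      have := List.drop_eq_nil_iff.mp hc
      simp only [List.length_cons] at this
      omega
    rw [pvSummary, ih1 htake, ih2 hdrop]
    have hsplit : (a :: b :: rest) = (a :: b :: rest).take ((a :: b :: rest).length / 2) ++ (a :: b :: rest).drop ((a :: b :: rest).length / 2) := (List.take_append_drop _ _).symm
    conv_rhs => rw [hsplit]
    rw [pvSum_append, pvMinPre_append _ _ htake]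

-- A's fused early-exit loop computes exactly the (total, min-prefix) test
lemma pvLoopA_eq (ts : List String) (c : Int) :
    pvLoopA ts c = ((c + pvSum ts == 1) && decide (0 ≤ c + pvMinPre ts)) := by
  induction ts generalizing c with
  | nil =>
    simp only [pvLoopA, pvSum, pvMinPre]
    by_cases h : c = 1 <;> simp [h]
  | cons t rest ih =>
    have hc : (if pvTokDigit t then c + 1 else if t == "~" then c else c - 1)
        = c + pvDelta t := by
      simp only [pvTokDigit, pvDelta]
      split_ifs <;> omega
    simp only [pvLoopA, hc, pvSum, pvMinPre]
    by_cases h : c + pvDelta t < 0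
    · simp only [if_pos h]
      have : ¬ (0 ≤ c + min (pvDelta t) (pvDelta t + pvMinPre rest)) := by omega
      simp [this]
    · simp only [if_neg h, ih]
      congr 1
      · rw [show c + pvDelta t + pvSum rest = c + (pvDelta t + pvSum rest) by ring]
      · exact decide_eq_decide.mpr (by omega)

theorem postfix_valid_spec : Claim_equal_postfix_valid := by
  intro s _
  show postfix_valid s = postfix_valid_alt s
  simp only [postfix_valid, postfix_valid_alt]
  by_cases hs : PySem.Str.split₀ s = []
  · by_cases he : s == ""
    · simp [hs, he]
    · simp [hs, he, pvLoopA]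
  · have hsne : s ≠ "" := by
      intro h; subst h; exact hs (by decide)
    simp only [beq_iff_eq, if_neg hsne]
    rw [pvLoopA_eq, pvSummary_eq _ hs]
    simp only [zero_add]
    rw [if_neg (show ¬ ((PySem.Str.split₀ s).isEmpty = true) by simp [List.isEmpty_iff, hs])]
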